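-- pv_equiv track=rewrite | github.com/afkzoro/alx-higher_level_programming | 0x05-python-exceptions/0-safe_print_list.py | safe_print_list
-- ===== SOURCE A (Python) =====
-- def safe_print_list(my_list=[], x=0):
--     new_list = []
--     try:
--         for i in range(0, x):
--             new_list.append(my_list[i])
--     except IndexError:
--         new = [str(int) for int in new_list]
--         return "".join(new)
--
--     new = [str(int) for int in new_list]
--     return "".join(new)
-- ===== SOURCE B (Python) =====
-- def safe_print_list(my_list=[], x=0):
--     elements = my_list[:x] if x >= 0 else []
--     return "".join(str(e) for e in elements)
-- ===== Notes on version B (the rewrite author's own statement) =====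
-- stated objective: simpler
-- what changed: Replaces the try/except index-by-index accumulation loop with a single bounded slice my_list[:x] (empty for negative x) joined directly.
import Mathlib
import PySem

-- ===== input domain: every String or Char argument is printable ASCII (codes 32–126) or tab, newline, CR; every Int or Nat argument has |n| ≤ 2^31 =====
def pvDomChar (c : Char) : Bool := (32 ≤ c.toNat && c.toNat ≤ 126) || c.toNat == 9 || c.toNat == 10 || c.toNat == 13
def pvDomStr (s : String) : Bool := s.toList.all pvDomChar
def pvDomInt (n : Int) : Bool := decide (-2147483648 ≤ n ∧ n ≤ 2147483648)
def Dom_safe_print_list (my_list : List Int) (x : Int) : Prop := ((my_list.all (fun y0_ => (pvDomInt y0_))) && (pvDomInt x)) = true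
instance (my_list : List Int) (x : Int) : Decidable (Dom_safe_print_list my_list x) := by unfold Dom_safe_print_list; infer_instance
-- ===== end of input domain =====

-- B replaces A's try/except index loop with one bounded slice plus join (objective: simpler).

-- ===== PORT A =====
-- the for-loop 'for i in range(0, x)' (range is lazy: iterate i = 0,1,… while i < x): appends my_list[i] to
-- new_list; stops (IndexError) when the index is out of range, returning the accumulated new_list either way
-- (both return statements join the same accumulator)
def safePrintLoopA (my_list : List Int) (x : Int) (i : Int) (acc : List Int) : List Int :=
  if _h : i < x then
    match PySem.List.pyGet? my_list i with
    | none => acc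
    | some v => safePrintLoopA my_list x (i + 1) (acc ++ [v])
  else acc
termination_by (x - i).toNat
decreasing_by omega

def safe_print_list (my_list : List Int) (x : Int) : String :=
  let new_list := safePrintLoopA my_list x 0 []
  PySem.Str.join "" (new_list.map PySem.Int.toStr)

-- ===== PORT B =====
def safe_print_list_alt (my_list : List Int) (x : Int) : String :=
  let elements := if x ≥ 0 then PySem.List.slice my_list none (some x) else []
  PySem.Str.join "" (elements.map PySem.Int.toStr)

-- ===== PRECONDITION & SPEC =====
def Spec_safe_print_list (my_list : List Int) (x : Int) (out : String) : Prop := out = safe_print_list_alt my_list x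
instance (my_list : List Int) (x : Int) (out : String) : Decidable (Spec_safe_print_list my_list x out) := by unfold Spec_safe_print_list; infer_instance

-- ===== CLAIM (what is proved, stated in full; the proofs are below) =====
def Claim_equal_safe_print_list : Prop := ∀ (my_list : List Int) (x : Int), Dom_safe_print_list my_list x → Spec_safe_print_list my_list x (safe_print_list my_list x)

-- ===== LEMMAS AND PROOFS =====

-- the loop from index j while j < x collects exactly (my_list.drop j).take ((x - j).toNat) onto the accumulator
lemma safePrintLoopA_eq (my_list : List Int) (x : Int) :
    ∀ (n : Nat) (j : Nat) (acc : List Int), (x - (j : Int)).toNat = n →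
      safePrintLoopA my_list x (j : Int) acc = acc ++ (my_list.drop j).take n := by
  intro n
  induction n with
  | zero =>
    intro j acc hn
    rw [safePrintLoopA, dif_neg (by omega)]
    simp
  | succ n ih =>
    intro j acc hn
    rw [safePrintLoopA, dif_pos (by omega), PySem.List.pyGet?_natCast]
    by_cases hj : j < my_list.length
    · rw [List.getElem?_eq_getElem hj]
      dsimp only
      have hcast : ((j : Int) + 1) = ((j + 1 : Nat) : Int) := by push_cast; ring
      rw [hcast, ih (j + 1) (acc ++ [my_list[j]]) (by omega)]
      have : (my_list.drop j).take (n + 1) = my_list[j] :: (my_list.drop (j + 1)).take n := by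
        rw [List.drop_eq_getElem_cons hj, List.take_succ_cons]
      rw [this]; simp
    · rw [List.getElem?_eq_none (by omega)]
      dsimp only
      have : my_list.drop j = [] := List.drop_eq_nil_of_le (by omega)
      simp [this]

-- ===== VERDICT (by name: the statement is the Claim_ definition above) =====
theorem safe_print_list_spec : Claim_equal_safe_print_list := by
  intro my_list x _
  unfold Spec_safe_print_list safe_print_list safe_print_list_alt
  by_cases hx : 0 ≤ x
  · rw [PySem.List.slice_to my_list hx, if_pos hx]
    have h0 : ((0 : Nat) : Int) = (0 : Int) := by norm_num
    rw [← h0, safePrintLoopA_eq my_list x x.toNat 0 [] (by omega)]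
    simp
  · rw [if_neg (by omega)]
    have h0 : ((0 : Nat) : Int) = (0 : Int) := by norm_num
    rw [← h0, safePrintLoopA_eq my_list x 0 0 [] (by omega)]
    simp
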